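-- pv_equiv track=rewrite | github.com/habunnywy/algorithm_item | leetcode/子串权重和.py | solve
-- ===== SOURCE A (Python) =====
-- def weight(s):
--     s_temp=s.copy()
--     cnt=0
--     if len(s)==2:
--         return 1 if s_temp[0]==s_temp[1] else 0
--
--     for i in range(1,len(s_temp)-1):
--         if s_temp[i-1]==s_temp[i]:
--             if s_temp[i]!=s_temp[i+1]:
--                 cnt+=1
--                 s_temp[i-1]=0 if s_temp[i]==1 else 1
--             else:
--                 cnt+=1
--                 s_temp[i]=0 if s_temp[i-1]==1 else 1
--         elif s_temp[i-1]!=s_temp[i]: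
--             if s_temp[i]!=s_temp[i+1]:
--                 continue
--             else:
--                 cnt+=1
--                 s_temp[i+1]=0 if s_temp[i]==1 else 1
--     return cnt
--
-- def solve(string):
--     n=len(string)
--     total_weight=0
--
--     for l in range(2,n+1):  # l 是子串的长度
--         for i in range(0,n-l+1):  # i 是子串的起始位置
--             substring=string[i:i+l]
--             total_weight+=weight(substring)
--
--     return total_weight
-- ===== SOURCE B (Python) =====
-- def step(a, b, c, cnt):
--     # one scan step of the weight function, carrying only the two working
--     # values (a, b) = current window left/middle and the running count
--     if a == b:
--         cnt += 1
--         if b != c: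
--             return b, c, cnt
--         return (0 if a == 1 else 1), c, cnt
--     if b == c:
--         return b, (0 if b == 1 else 1), cnt + 1
--     return b, c, cnt
--
--
-- def solve(string):
--     # O(n^2): for each start i, extend the right end one element at a time,
--     # carrying the scan state instead of rescanning every substring.
--     n = len(string)
--     total = 0
--     for i in range(n - 1):
--         a = string[i]
--         b = string[i + 1]
--         total += 1 if a == b else 0
--         cnt = 0
--         for c in string[i + 2:]:
--             a, b, cnt = step(a, b, c, cnt)
--             total += cnt
--     return total
-- ===== Notes on version B (the rewrite author's own statement) =====
-- stated objective: faster
-- what changed: Instead of recomputing weight() from scratch for every substring (three nested loops), B fixes the start index and extends the right end one element at a time, carrying the scan state (the running count and the last two working values) so each substring costs O(1).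
import Mathlib
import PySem

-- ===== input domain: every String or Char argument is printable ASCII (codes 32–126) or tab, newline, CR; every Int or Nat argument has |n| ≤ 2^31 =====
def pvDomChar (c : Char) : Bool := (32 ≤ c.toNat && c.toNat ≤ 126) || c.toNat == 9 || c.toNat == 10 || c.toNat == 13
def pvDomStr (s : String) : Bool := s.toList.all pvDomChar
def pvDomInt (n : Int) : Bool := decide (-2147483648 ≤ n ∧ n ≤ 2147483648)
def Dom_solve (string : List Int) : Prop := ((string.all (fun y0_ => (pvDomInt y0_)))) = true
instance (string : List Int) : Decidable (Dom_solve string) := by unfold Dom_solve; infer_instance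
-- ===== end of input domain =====

-- B replaces A's per-substring rescan by an incremental scan per start index (O(n^2) instead of O(n^3)); same return value.

-- ===== PORT A =====
-- one iteration of weight's for-loop: state (s_temp, cnt), index i
def stepA (st : List Int × Int) (i : Int) : List Int × Int :=
  let t := st.1
  let c := st.2
  if PySem.List.pyGetD t (i - 1) 0 = PySem.List.pyGetD t i 0 then
    if PySem.List.pyGetD t i 0 ≠ PySem.List.pyGetD t (i + 1) 0 then
      (PySem.List.pySetD t (i - 1) (if PySem.List.pyGetD t i 0 = 1 then 0 else 1), c + 1)
    else
      (PySem.List.pySetD t i (if PySem.List.pyGetD t (i - 1) 0 = 1 then 0 else 1), c + 1)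
  else
    if PySem.List.pyGetD t i 0 ≠ PySem.List.pyGetD t (i + 1) 0 then (t, c)
    else
      (PySem.List.pySetD t (i + 1) (if PySem.List.pyGetD t i 0 = 1 then 0 else 1), c + 1)

def weightA (s : List Int) : Int :=
  let sTemp := s
  let cnt : Int := 0
  if s.length = 2 then
    (if PySem.List.pyGetD sTemp 0 0 = PySem.List.pyGetD sTemp 1 0 then 1 else 0)
  else
    ((PySem.List.pyRange 1 ((sTemp.length : Int) - 1) 1).foldl stepA (sTemp, cnt)).2

def solve (string : List Int) : Int :=
  let n : Int := string.length
  (PySem.List.pyRange 2 (n + 1) 1).foldl (fun total_weight l =>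
    (PySem.List.pyRange 0 (n - l + 1) 1).foldl (fun tw i =>
      tw + weightA (PySem.List.slice string (some i) (some (i + l)))) total_weight) 0

-- ===== PORT B =====
def step (a b c cnt : Int) : Int × Int × Int :=
  if a = b then
    if b ≠ c then (b, c, cnt + 1)
    else ((if a = 1 then 0 else 1), c, cnt + 1)
  else
    if b = c then (b, (if b = 1 then 0 else 1), cnt + 1)
    else (b, c, cnt)

def solve_alt (string : List Int) : Int :=
  let n : Int := string.length
  (PySem.List.pyRange 0 (n - 1) 1).foldl (fun total i =>
    let a := PySem.List.pyGetD string i 0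
    let b := PySem.List.pyGetD string (i + 1) 0
    let total := total + (if a = b then 1 else 0)
    ((PySem.List.slice string (some (i + 2)) none).foldl
      (fun (st : Int × Int × Int × Int) c =>
        let s := step st.1 st.2.1 c st.2.2.1
        (s.1, s.2.1, s.2.2, st.2.2.2 + s.2.2))
      (a, b, 0, total)).2.2.2) 0

-- ===== PRECONDITION & SPEC =====
def Spec_solve (string : List Int) (out : Int) : Prop := out = solve_alt string
instance (string : List Int) (out : Int) : Decidable (Spec_solve string out) := by unfold Spec_solve; infer_instance

-- ===== CLAIM (what is proved, stated in full; the proofs are below) =====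
def Claim_equal_solve : Prop := ∀ (string : List Int), Dom_solve string → Spec_solve string (solve string)

-- ===== LEMMAS AND PROOFS =====

-- the scan state chained over a list (proof-side characterisation of both loops)
def chain (a b cnt : Int) (cs : List Int) : Int × Int × Int :=
  match cs with
  | [] => (a, b, cnt)
  | c :: cs' => let s := step a b c cnt; chain s.1 s.2.1 s.2.2 cs'

-- running sum of counts produced by B's inner loop
def isum (a b cnt : Int) (cs : List Int) : Int :=
  match cs with
  | [] => 0
  | c :: cs' => let s := step a b c cnt; s.2.2 + isum s.1 s.2.1 s.2.2 cs'

-- substring weight, proof-side shorthand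
def W (s : List Int) (i l : ℕ) : Int := weightA ((s.drop i).take l)

theorem chain_cons (a b cnt c : Int) (cs : List Int) :
    chain a b cnt (c :: cs) = chain (step a b c cnt).1 (step a b c cnt).2.1 (step a b c cnt).2.2 cs := rfl

theorem step_eq1 {a b c : Int} (hab : a = b) (hbc : b = c) (cnt : Int) :
    step a b c cnt = ((if a = 1 then 0 else 1), c, cnt + 1) := by
  unfold step; rw [if_pos hab, if_neg (fun hne => hne hbc)]

theorem step_eq2 {a b c : Int} (hab : a = b) (hbc : b ≠ c) (cnt : Int) :
    step a b c cnt = (b, c, cnt + 1) := by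
  unfold step; rw [if_pos hab, if_pos hbc]

theorem step_eq3 {a b c : Int} (hab : ¬ a = b) (hbc : b = c) (cnt : Int) :
    step a b c cnt = (b, (if b = 1 then 0 else 1), cnt + 1) := by
  unfold step; rw [if_neg hab, if_pos hbc]

theorem step_eq4 {a b c : Int} (hab : ¬ a = b) (hbc : b ≠ c) (cnt : Int) :
    step a b c cnt = (b, c, cnt) := by
  unfold step; rw [if_neg hab, if_neg hbc]

theorem getD_mid0 (pre : List Int) (x : Int) (rest : List Int) (d : Int) :
    (pre ++ x :: rest).getD pre.length d = x := by
  induction pre with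
  | nil => rfl
  | cons p ps ih => simp

theorem getD_mid1 (pre : List Int) (x y : Int) (rest : List Int) (d : Int) :
    (pre ++ x :: y :: rest).getD (pre.length + 1) d = y := by
  induction pre with
  | nil => rfl
  | cons p ps ih => simp

theorem getD_mid2 (pre : List Int) (x y z : Int) (rest : List Int) (d : Int) :
    (pre ++ x :: y :: z :: rest).getD (pre.length + 2) d = z := by
  induction pre with
  | nil => rfl
  | cons p ps ih => simp

theorem set_mid0 (pre : List Int) (x : Int) (rest : List Int) (v : Int) :
    (pre ++ x :: rest).set pre.length v = pre ++ v :: rest := by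
  induction pre with
  | nil => rfl
  | cons p ps ih => simp [ih]

theorem set_mid1 (pre : List Int) (x y : Int) (rest : List Int) (v : Int) :
    (pre ++ x :: y :: rest).set (pre.length + 1) v = pre ++ x :: v :: rest := by
  induction pre with
  | nil => rfl
  | cons p ps ih => simp [ih]

theorem set_mid2 (pre : List Int) (x y z : Int) (rest : List Int) (v : Int) :
    (pre ++ x :: y :: z :: rest).set (pre.length + 2) v = pre ++ x :: y :: v :: rest := by
  induction pre with
  | nil => rfl
  | cons p ps ih => simp [ih]

-- one step of A's loop at index pre.length + 1, on a list of shape pre ++ a :: b :: c :: rest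
theorem stepA_mid (pre : List Int) (a b c : Int) (rest : List Int) (cnt : Int) :
    stepA (pre ++ a :: b :: c :: rest, cnt) (((pre.length + 1 : Nat)) : Int)
      = (if a = b then
           (if b ≠ c then pre ++ (if b = 1 then 0 else 1) :: b :: c :: rest
            else pre ++ a :: (if a = 1 then 0 else 1) :: c :: rest,
            cnt + 1)
         else
           (if b ≠ c then (pre ++ a :: b :: c :: rest, cnt)
            else (pre ++ a :: b :: (if b = 1 then 0 else 1) :: rest, cnt + 1))) := by
  have e0 : (((pre.length + 1 : Nat)) : Int) - 1 = ((pre.length : Nat) : Int) := by push_cast; ring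
  have e2 : (((pre.length + 1 : Nat)) : Int) + 1 = (((pre.length + 2 : Nat)) : Int) := by push_cast; ring
  unfold stepA
  simp only [e0, e2, PySem.List.pyGetD_natCast, PySem.List.pySetD_natCast,
    getD_mid0, getD_mid1, getD_mid2, set_mid0, set_mid1, set_mid2]
  split_ifs <;> rfl

-- pyRange over natural casts is a mapped List.range'
theorem pyRange_cast (u v : Nat) :
    PySem.List.pyRange (u : Int) (v : Int) = (List.range' u (v - u)).map (fun (k : ℕ) => (k : Int)) := by
  rw [PySem.List.pyRange_one, List.range'_eq_map_range, List.map_map]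
  have ht : ((v : Int) - (u : Int)).toNat = v - u := by omega
  rw [ht]
  exact List.map_congr_left (fun k _ => by simp)

-- invariant of weight's loop: it is the chained scan, and the list keeps the shape q ++ [a', b']
theorem foldA_chain (cs : List Int) : ∀ (pre : List Int) (a b cnt : Int),
    ∃ q : List Int, q.length = pre.length + cs.length ∧
      (List.range' (pre.length + 1) cs.length).foldl (fun st (k : ℕ) => stepA st (k : Int)) (pre ++ a :: b :: cs, cnt)
        = (q ++ [(chain a b cnt cs).1, (chain a b cnt cs).2.1], (chain a b cnt cs).2.2) := by
  induction cs with
  | nil =>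
    intro pre a b cnt
    exact ⟨pre, by simp, by simp [chain]⟩
  | cons c cs' ih =>
    intro pre a b cnt
    rw [List.length_cons, List.range'_succ, List.foldl_cons]
    rw [stepA_mid pre a b c cs' cnt]
    by_cases hab : a = b
    · by_cases hbc : b = c
      · obtain ⟨q, hq, hf⟩ := ih (pre ++ [a]) (if a = 1 then 0 else 1) c (cnt + 1)
        simp only [List.length_append, List.length_cons, List.length_nil, Nat.zero_add] at hf hq
        refine ⟨q, by omega, ?_⟩
        rw [chain_cons, step_eq1 hab hbc cnt, if_pos hab, if_neg (fun hne => hne hbc)]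
        simpa [List.append_assoc] using hf
      · obtain ⟨q, hq, hf⟩ := ih (pre ++ [if b = 1 then 0 else 1]) b c (cnt + 1)
        simp only [List.length_append, List.length_cons, List.length_nil, Nat.zero_add] at hf hq
        refine ⟨q, by omega, ?_⟩
        rw [chain_cons, step_eq2 hab hbc cnt, if_pos hab, if_pos hbc]
        simpa [List.append_assoc] using hf
    · by_cases hbc : b = c
      · obtain ⟨q, hq, hf⟩ := ih (pre ++ [a]) b (if b = 1 then 0 else 1) (cnt + 1)
        simp only [List.length_append, List.length_cons, List.length_nil, Nat.zero_add] at hf hq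
        refine ⟨q, by omega, ?_⟩
        rw [chain_cons, step_eq3 hab hbc cnt, if_neg hab, if_neg (fun hne => hne hbc)]
        simpa [List.append_assoc] using hf
      · obtain ⟨q, hq, hf⟩ := ih (pre ++ [a]) b c cnt
        simp only [List.length_append, List.length_cons, List.length_nil, Nat.zero_add] at hf hq
        refine ⟨q, by omega, ?_⟩
        rw [chain_cons, step_eq4 hab hbc cnt, if_neg hab, if_pos hbc]
        simpa [List.append_assoc] using hf

theorem weightA_chain (x y : Int) (cs : List Int) (h : cs ≠ []) :
    weightA (x :: y :: cs) = (chain x y 0 cs).2.2 := by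
  unfold weightA
  have hlen : (x :: y :: cs).length = cs.length + 2 := by simp
  have hpos : 0 < cs.length := List.length_pos_of_ne_nil h
  rw [if_neg (by rw [hlen]; omega)]
  have hb : ((x :: y :: cs).length : Int) - 1 = ((cs.length + 1 : Nat) : Int) := by
    rw [hlen]; push_cast; ring
  have hr := pyRange_cast 1 (cs.length + 1)
  rw [Nat.cast_one] at hr
  rw [hb, hr, List.foldl_map]
  obtain ⟨q, hq, hf⟩ := foldA_chain cs [] x y 0
  simp only [List.length_nil, Nat.zero_add, List.nil_append] at hf
  rw [show cs.length + 1 - 1 = cs.length by omega, hf]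

theorem weightA_pair (x y : Int) : weightA [x, y] = if x = y then 1 else 0 := by
  have g0 : PySem.List.pyGetD [x, y] 0 0 = x := PySem.List.pyGetD_zero_cons _ _ _
  have g1 : PySem.List.pyGetD [x, y] 1 0 = y := by
    rw [show (1 : Int) = ((1 : Nat) : Int) by norm_num, PySem.List.pyGetD_natCast]; rfl
  unfold weightA
  rw [if_pos (by simp), g0, g1]

-- B's inner loop in terms of chain and isum
theorem fold4_eq (cs : List Int) : ∀ (a b cnt tot : Int),
    cs.foldl (fun (st : Int × Int × Int × Int) c =>
        let s := step st.1 st.2.1 c st.2.2.1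
        (s.1, s.2.1, s.2.2, st.2.2.2 + s.2.2)) (a, b, cnt, tot)
      = ((chain a b cnt cs).1, (chain a b cnt cs).2.1, (chain a b cnt cs).2.2,
          tot + isum a b cnt cs) := by
  induction cs with
  | nil => intro a b cnt tot; simp [chain, isum]
  | cons c cs' ih =>
    intro a b cnt tot
    rw [List.foldl_cons]
    show cs'.foldl _ ((step a b c cnt).1, (step a b c cnt).2.1, (step a b c cnt).2.2,
        tot + (step a b c cnt).2.2) = _
    rw [ih]
    simp only [chain, isum]
    ring_nf

theorem isum_eq_sum (cs : List Int) : ∀ (a b cnt : Int),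
    isum a b cnt cs = ∑ m ∈ Finset.range cs.length, (chain a b cnt (cs.take (m + 1))).2.2 := by
  induction cs with
  | nil => intro a b cnt; simp [isum]
  | cons c cs' ih =>
    intro a b cnt
    rw [List.length_cons, Finset.sum_range_succ']
    have hterm : ∀ m, chain a b cnt ((c :: cs').take (m + 1 + 1))
        = chain (step a b c cnt).1 (step a b c cnt).2.1 (step a b c cnt).2.2 (cs'.take (m + 1)) := by
      intro m; simp [List.take_succ_cons, chain]
    have h0 : chain a b cnt ((c :: cs').take 1) = step a b c cnt := by
      simp [List.take_succ_cons, chain]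
    simp only [hterm, h0]
    rw [show isum a b cnt (c :: cs')
        = (step a b c cnt).2.2 + isum (step a b c cnt).1 (step a b c cnt).2.1 (step a b c cnt).2.2 cs'
        from rfl, ih]
    ring

theorem sum_map_range (m : ℕ) (f : ℕ → Int) :
    ((List.range m).map f).sum = ∑ j ∈ Finset.range m, f j := by
  induction m with
  | zero => rfl
  | succ k ih => rw [List.range_succ, Finset.sum_range_succ, List.map_append, List.sum_append, ih]; simp

theorem sum_tri (n : ℕ) (g : ℕ → ℕ → Int) :
    ∑ x ∈ Finset.range n, ∑ y ∈ Finset.range (n - x), g x y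
      = ∑ y ∈ Finset.range n, ∑ x ∈ Finset.range (n - y), g x y := by
  have key : ∀ (h : ℕ → ℕ → Int) (x : ℕ),
      ∑ y ∈ Finset.range (n - x), h x y = ∑ y ∈ Finset.range n, if x + y < n then h x y else 0 := by
    intro h x
    rw [Finset.sum_ite, Finset.sum_const_zero, add_zero]
    apply Finset.sum_congr _ (fun _ _ => rfl)
    ext y
    simp only [Finset.mem_filter, Finset.mem_range]
    omega
  calc ∑ x ∈ Finset.range n, ∑ y ∈ Finset.range (n - x), g x y
      = ∑ x ∈ Finset.range n, ∑ y ∈ Finset.range n, if x + y < n then g x y else 0 := by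
        exact Finset.sum_congr rfl (fun x _ => key g x)
    _ = ∑ y ∈ Finset.range n, ∑ x ∈ Finset.range n, if x + y < n then g x y else 0 :=
        Finset.sum_comm
    _ = ∑ y ∈ Finset.range n, ∑ x ∈ Finset.range (n - y), g x y := by
        refine Finset.sum_congr rfl (fun y _ => ?_)
        rw [key (fun y x => g x y) y]
        exact Finset.sum_congr rfl (fun x _ => by rw [show y + x = x + y from Nat.add_comm y x])

-- A's program as a double Finset sum
theorem solveA_sum (s : List Int) :
    solve s = ∑ k ∈ Finset.range (s.length - 1), ∑ j ∈ Finset.range (s.length - 1 - k), W s j (k + 2) := by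
  unfold solve
  dsimp only
  have hend : ((s.length : Int) + 1) = (((s.length + 1 : Nat)) : Int) := by push_cast; ring
  have h2 : (2 : Int) = ((2 : Nat) : Int) := by norm_num
  rw [hend, h2, pyRange_cast 2 (s.length + 1), List.foldl_map,
    show s.length + 1 - 2 = s.length - 1 from by omega]
  have hbody : ∀ (tot : Int) (k : ℕ),
      (PySem.List.pyRange 0 ((s.length : Int) - (k : Int) + 1) 1).foldl
        (fun tw i => tw + weightA (PySem.List.slice s (some i) (some (i + (k : Int))))) tot
      = tot + ((PySem.List.pyRange 0 ((s.length : Int) - (k : Int) + 1) 1).map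
          (fun i => weightA (PySem.List.slice s (some i) (some (i + (k : Int)))))).sum :=
    fun tot k => PySem.List.foldl_add _ _ _
  simp only [hbody]
  rw [PySem.List.foldl_add, zero_add, List.range'_eq_map_range, List.map_map, sum_map_range]
  refine Finset.sum_congr rfl (fun k hk => ?_)
  have hk' : k < s.length - 1 := Finset.mem_range.mp hk
  have he : (s.length : Int) - ((2 + k : Nat) : Int) + 1 = ((s.length - 1 - k : Nat) : Int) := by
    omega
  simp only [Function.comp]
  rw [he, PySem.List.pyRange_zero_natCast, List.map_map, sum_map_range]
  refine Finset.sum_congr rfl (fun j hj => ?_)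
  simp only [Function.comp]
  rw [show ((j : Nat) : Int) + ((2 + k : Nat) : Int) = (((j + (2 + k) : Nat)) : Int) from by
        push_cast; ring,
    PySem.List.slice_natCast, show j + (2 + k) - j = k + 2 from by omega]
  rfl

-- B's program as a double Finset sum
theorem solveB_sum (s : List Int) :
    solve_alt s = ∑ i ∈ Finset.range (s.length - 1), ∑ m ∈ Finset.range (s.length - 1 - i), W s i (m + 2) := by
  rcases Nat.eq_zero_or_pos s.length with h0 | hpos
  · have hs : s = [] := List.eq_nil_of_length_eq_zero h0
    subst hs
    rfl
  unfold solve_alt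
  dsimp only
  have hend : ((s.length : Int) - 1) = (((s.length - 1 : Nat)) : Int) := by omega
  rw [hend, PySem.List.pyRange_zero_natCast, List.foldl_map]
  have hbody : ∀ (tot : Int) (i : ℕ),
      (tot + (if PySem.List.pyGetD s (i : Int) 0 = PySem.List.pyGetD s ((i : Int) + 1) 0 then 1 else 0)
        + isum (PySem.List.pyGetD s (i : Int) 0) (PySem.List.pyGetD s ((i : Int) + 1) 0) 0
            (PySem.List.slice s (some ((i : Int) + 2)) none))
      = tot + ((if PySem.List.pyGetD s (i : Int) 0 = PySem.List.pyGetD s ((i : Int) + 1) 0 then 1 else 0)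
        + isum (PySem.List.pyGetD s (i : Int) 0) (PySem.List.pyGetD s ((i : Int) + 1) 0) 0
            (PySem.List.slice s (some ((i : Int) + 2)) none)) := fun tot i => by ring
  simp only [fold4_eq]
  simp only [hbody]
  rw [PySem.List.foldl_add, zero_add, sum_map_range]
  refine Finset.sum_congr rfl (fun i hi => ?_)
  have hi' : i < s.length - 1 := Finset.mem_range.mp hi
  have hia : i < s.length := by omega
  have hib : i + 1 < s.length := by omega
  have ga : PySem.List.pyGetD s (i : Int) 0 = s[i] := by
    rw [PySem.List.pyGetD_natCast, List.getD_eq_getElem s 0 hia]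
  have gb : PySem.List.pyGetD s ((i : Int) + 1) 0 = s[i + 1] := by
    rw [show ((i : Nat) : Int) + 1 = (((i + 1 : Nat)) : Int) from by push_cast; ring,
      PySem.List.pyGetD_natCast, List.getD_eq_getElem s 0 hib]
  have hslice : PySem.List.slice s (some ((i : Int) + 2)) none = s.drop (i + 2) := by
    rw [show ((i : Nat) : Int) + 2 = (((i + 2 : Nat)) : Int) from by push_cast; ring,
      PySem.List.slice_from_natCast]
  have hdrop1 : s.drop i = s[i] :: s.drop (i + 1) := (List.getElem_cons_drop hia).symm
  have hdrop2 : s.drop (i + 1) = s[i + 1] :: s.drop (i + 2) := by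
    rw [← List.getElem_cons_drop hib]
  rw [ga, gb, hslice]
  -- right-hand side: peel off the length-2 substring
  rw [show s.length - 1 - i = (s.length - 2 - i) + 1 from by omega, Finset.sum_range_succ']
  have hW2 : W s i 2 = if s[i] = s[i + 1] then 1 else 0 := by
    unfold W
    rw [hdrop1, hdrop2]
    simp only [List.take_succ_cons, List.take_zero]
    exact weightA_pair _ _
  have hlen : (s.drop (i + 2)).length = s.length - 2 - i := by
    rw [List.length_drop]; omega
  rw [isum_eq_sum, hlen, hW2]
  have hterm : ∀ m, m < s.length - 2 - i →
      (chain s[i] s[i + 1] 0 ((s.drop (i + 2)).take (m + 1))).2.2 = W s i (m + 1 + 2) := by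
    intro m hm
    have htk : ((s.drop (i + 2)).take (m + 1)).length = m + 1 := by
      rw [List.length_take]; omega
    have hne : (s.drop (i + 2)).take (m + 1) ≠ [] := by
      intro hx; rw [hx] at htk; simp at htk
    rw [← weightA_chain _ _ _ hne]
    unfold W
    rw [hdrop1, hdrop2, show m + 1 + 2 = (m + 1) + 1 + 1 from rfl]
    simp only [List.take_succ_cons]
  rw [Finset.sum_congr rfl (fun m hm => hterm m (Finset.mem_range.mp hm))]
  ring

-- ===== VERDICT (by name: the statement is the Claim_ definition above) =====
theorem solve_spec : Claim_equal_solve := by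
  intro s _
  unfold Spec_solve
  rw [solveA_sum, solveB_sum]
  exact sum_tri (s.length - 1) (fun x y => W s y (x + 2))
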